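-- pv_equiv track=rewrite | github.com/oriyor/turning_tables | Training/ContinuousPreTraining/predictors/span_predictor.py | get_span_prediction_dict
-- ===== SOURCE A (Python) =====
-- def get_span_prediction_dict(predictions):
--     """
--     method to get dictionary between spans and their predictions
--     """
--     span_prediction_dict = {}
--     i = 0
--     num_predicted_tokens = len(predictions)
--     last_extra_id = None
--
--     # iterate over all tokens
--     while i < num_predicted_tokens:
--         pred_token = predictions[i]
--
--         # check if this is an extra id token
--         if 32000 <= pred_token <= 33000:
--             span_prediction_dict[pred_token] = []
--             last_extra_id = pred_token
--
--         else:
--             if last_extra_id is not None: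
--                 span_prediction_dict[last_extra_id].append(pred_token)
--
--         # raise cnt for i
--         i += 1
--     return span_prediction_dict
-- ===== SOURCE B (Python) =====
-- def get_span_prediction_dict(predictions):
--     """
--     method to get dictionary between spans and their predictions
--     """
--     span_prediction_dict = {}
--     rest = predictions
--     # peel off one whole segment per marker token instead of a per-token state machine
--     while rest:
--         t = rest[0]
--         if 32000 <= t <= 33000:
--             j = 1
--             while j < len(rest) and not (32000 <= rest[j] <= 33000):
--                 j += 1
--             span_prediction_dict[t] = rest[1:j]
--             rest = rest[j:]
--         else:
--             rest = rest[1:]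
--     return span_prediction_dict
-- ===== Notes on version B (the rewrite author's own statement) =====
-- stated objective: alternative
-- what changed: Replaced A's per-token state machine (last_extra_id plus incremental dict-entry appends) by segment peeling: on each marker the whole following non-marker run is assigned to the dict entry at once.
import Mathlib
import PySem

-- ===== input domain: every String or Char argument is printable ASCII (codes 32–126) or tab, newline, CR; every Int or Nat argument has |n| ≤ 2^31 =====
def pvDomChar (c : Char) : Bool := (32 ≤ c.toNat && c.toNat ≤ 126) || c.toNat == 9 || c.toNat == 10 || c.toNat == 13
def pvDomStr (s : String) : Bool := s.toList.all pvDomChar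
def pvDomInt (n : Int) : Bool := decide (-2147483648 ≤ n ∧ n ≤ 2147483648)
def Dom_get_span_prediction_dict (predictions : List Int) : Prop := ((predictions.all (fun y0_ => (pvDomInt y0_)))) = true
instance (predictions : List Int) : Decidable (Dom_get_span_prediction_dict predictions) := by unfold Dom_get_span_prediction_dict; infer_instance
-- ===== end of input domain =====

-- B replaces A's per-token state machine (last_extra_id + incremental appends) by peeling off one
-- whole marker segment at a time (objective: alternative decomposition, same cost).

-- dict assignment d[k] = v: overwrite keeps position, new key appends (shared dict primitive)
def dSet (d : List (Int × List Int)) (k : Int) (v : List Int) : List (Int × List Int) :=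
  if d.any (fun p => p.1 = k) then d.map (fun p => if p.1 = k then (k, v) else p)
  else d ++ [(k, v)]

-- ===== PORT A =====
-- d[m].append(t)
def dApp (d : List (Int × List Int)) (m t : Int) : List (Int × List Int) :=
  d.map (fun p => if p.1 = m then (p.1, p.2 ++ [t]) else p)

-- the while loop over i, as structural recursion over the remaining tokens with the same state
def aGo : List Int → List (Int × List Int) → Option Int → List (Int × List Int)
  | [], d, _ => d
  | t :: ts, d, last =>
    if 32000 ≤ t ∧ t ≤ 33000 then aGo ts (dSet d t []) (some t)
    else
      match last with
      | none => aGo ts d none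
      | some m => aGo ts (dApp d m t) (some m)

def get_span_prediction_dict (predictions : List Int) : List (Int × List Int) :=
  aGo predictions [] none

-- ===== PORT B =====
def isMarker (t : Int) : Bool := decide (32000 ≤ t) && decide (t ≤ 33000)

-- outer while loop of Source B: skip a non-marker, or consume marker + its whole segment
def bGo : List Int → List (Int × List Int) → List (Int × List Int)
  | [], d => d
  | t :: ts, d =>
    if isMarker t then
      bGo (ts.dropWhile (fun x => !isMarker x))
        (dSet d t (ts.takeWhile (fun x => !isMarker x)))
    else bGo ts d
  termination_by l => l.length
  decreasing_by
  · simpa using Nat.lt_succ_of_le (List.length_dropWhile_le _ _)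
  · simp

def get_span_prediction_dict_alt (predictions : List Int) : List (Int × List Int) :=
  bGo predictions []

-- ===== PRECONDITION & SPEC =====
def Spec_get_span_prediction_dict (predictions : List Int) (out : List (Int × List Int)) : Prop := out = get_span_prediction_dict_alt predictions
instance (predictions : List Int) (out : List (Int × List Int)) : Decidable (Spec_get_span_prediction_dict predictions out) := by unfold Spec_get_span_prediction_dict; infer_instance

-- ===== CLAIM (what is proved, stated in full; the proofs are below) =====
def Claim_equal_get_span_prediction_dict : Prop := ∀ (predictions : List Int), Dom_get_span_prediction_dict predictions → Spec_get_span_prediction_dict predictions (get_span_prediction_dict predictions)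

-- ===== LEMMAS AND PROOFS =====

-- appending one token to the entry just set: d[k]=v; d[k].append(t)  ≡  d[k] = v ++ [t]
theorem dApp_dSet (d : List (Int × List Int)) (m t : Int) (v : List Int) :
    dApp (dSet d m v) m t = dSet d m (v ++ [t]) := by
  unfold dSet dApp
  by_cases h : d.any (fun p => p.1 = m)
  · simp only [h, if_true, List.map_map]
    apply List.map_congr_left
    intro p _
    by_cases hp : p.1 = m <;> simp [hp]
  · simp only [h]
    have hmap : d.map (fun p => if p.1 = m then (p.1, p.2 ++ [t]) else p) = d := by
      conv_rhs => rw [← List.map_id d]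
      apply List.map_congr_left
      intro p hp
      have hne : ¬ p.1 = m := by
        intro hpm
        exact absurd (List.any_eq_true.mpr ⟨p, hp, by simp [hpm]⟩) h
      simp [hne]
    simp [List.map_append, hmap]

-- while last_extra_id = some m and the dict entry for m was just set to v,
-- A appends the following non-marker run to it — i.e. one whole segment at once.
theorem seg_lemma : ∀ (l : List Int) (d : List (Int × List Int)) (m : Int) (v : List Int),
    aGo l (dSet d m v) (some m)
      = bGo (l.dropWhile (fun x => !isMarker x)) (dSet d m (v ++ l.takeWhile (fun x => !isMarker x))) := by
  intro l
  induction l with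
  | nil => intro d m v; simp [aGo, bGo]
  | cons t ts ih =>
    intro d m v
    by_cases h : 32000 ≤ t ∧ t ≤ 33000
    · have hm : isMarker t = true := by simp [isMarker, h.1, h.2]
      simp only [aGo, if_pos h, List.takeWhile_cons, List.dropWhile_cons, hm,
        Bool.not_true]
      rw [ih (dSet d m v) t []]
      simp [bGo, hm]
    · have hm : isMarker t = false := by
        simp only [isMarker, Bool.and_eq_false_iff, decide_eq_false_iff_not]
        omega
      simp only [aGo, if_neg h, dApp_dSet, List.takeWhile_cons, List.dropWhile_cons, hm,
        Bool.not_false, if_true]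
      rw [ih d m (v ++ [t])]
      simp

theorem main_lemma : ∀ (l : List Int) (d : List (Int × List Int)),
    aGo l d none = bGo l d := by
  intro l
  induction l with
  | nil => intro d; simp [aGo, bGo]
  | cons t ts ih =>
    intro d
    by_cases h : 32000 ≤ t ∧ t ≤ 33000
    · have hm : isMarker t = true := by simp [isMarker, h.1, h.2]
      simp only [aGo, if_pos h, bGo, hm, if_true]
      simpa using seg_lemma ts d t []
    · have hm : isMarker t = false := by
        simp only [isMarker, Bool.and_eq_false_iff, decide_eq_false_iff_not]
        omega
      simp only [aGo, if_neg h, bGo, hm]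
      exact ih d

-- ===== VERDICT (by name: the statement is the Claim_ definition above) =====
theorem get_span_prediction_dict_spec : Claim_equal_get_span_prediction_dict := by
  intro p _
  unfold Spec_get_span_prediction_dict get_span_prediction_dict get_span_prediction_dict_alt
  exact main_lemma p []
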